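-- pv_equiv track=rewrite | github.com/arekouzounian/cs-hw | cs270/hw2/footballprob.py | func
-- ===== SOURCE A (Python) =====
-- def func(b, r):
--     b.sort()
--     r.sort()
--
--     matches = {}
--
--     for i in range(len(b)):
--         back = i
--         if back not in matches:
--             for j in range(len(r)):
--                 if j not in matches.values():
--                     matches[back] = j
--                     break
--         else:
--             for i in range(matches[back], len(r)):
--                 if r[i] < back:
--                     matches[back] = i
--
--     lst = []
--     for match in matches:
--         lst.append((b[match], r[matches[match]]))
--
--     return lst
-- ===== SOURCE B (Python) =====
-- # B: sort both lists and zip element-wise (truncating to the shorter length),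
-- # replacing A's quadratic inner scan over dict values. Like A, sorts b and r in place.
-- def func(b, r):
--     b.sort()
--     r.sort()
--     return list(zip(b, r))
-- ===== Notes on version B (the rewrite author's own statement) =====
-- stated objective: faster
-- what changed: A builds an index dict with a linear scan over dict values for every element (and dead else-branch code); B just sorts both lists and zips them up to the shorter length.
import Mathlib
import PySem

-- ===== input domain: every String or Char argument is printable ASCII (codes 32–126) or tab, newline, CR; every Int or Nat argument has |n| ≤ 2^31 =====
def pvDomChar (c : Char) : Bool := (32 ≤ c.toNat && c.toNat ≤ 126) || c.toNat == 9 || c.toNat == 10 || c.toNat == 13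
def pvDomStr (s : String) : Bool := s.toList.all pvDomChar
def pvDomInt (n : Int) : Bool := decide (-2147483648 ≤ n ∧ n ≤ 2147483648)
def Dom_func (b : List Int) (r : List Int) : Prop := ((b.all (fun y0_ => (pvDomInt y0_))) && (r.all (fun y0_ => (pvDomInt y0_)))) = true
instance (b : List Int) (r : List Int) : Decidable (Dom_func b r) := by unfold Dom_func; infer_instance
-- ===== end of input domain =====

-- B replaces A's quadratic dict-building loop by sort-both-and-zip; equivalence of RETURN
-- values only (both A and B sort their list arguments in place, an identical side effect).

-- ===== PORT A =====
-- inner 'for j in range(len(r)): if j not in matches.values(): matches[back] = j; break'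
def innerA (back : Int) (m : PySem.Dict Int Int) : List Nat → PySem.Dict Int Int
  | [] => m
  | j :: rest =>
      if m.values.contains (j : Int) = false then m.insert back (j : Int)
      else innerA back m rest

-- else branch: 'for i in range(matches[back], len(r)): if r[i] < back: matches[back] = i'
def elseA (back : Int) (rs : List Int) (m : PySem.Dict Int Int) : PySem.Dict Int Int :=
  (PySem.List.pyRange ((m.get? back).getD 0) (rs.length : Int) 1).foldl
    (fun m i => if ((PySem.List.pyGet? rs i).getD 0) < back then m.insert back i else m) m

def func (b : List Int) (r : List Int) : List (Int × Int) :=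
  let bs := PySem.List.sorted b (fun x => x) false
  let rs := PySem.List.sorted r (fun x => x) false
  let m := (List.range bs.length).foldl (fun (m : PySem.Dict Int Int) (i : Nat) =>
      if m.contains (i : Int) = false then innerA (i : Int) m (List.range rs.length)
      else elseA (i : Int) rs m) PySem.Dict.empty
  m.keys.foldl (fun acc k =>
    acc ++ [(((PySem.List.pyGet? bs k).getD 0),
             ((PySem.List.pyGet? rs ((m.get? k).getD 0)).getD 0))]) []

-- ===== PORT B =====
def func_alt (b : List Int) (r : List Int) : List (Int × Int) :=
  List.zip (PySem.List.sorted b (fun x => x) false) (PySem.List.sorted r (fun x => x) false)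

-- ===== PRECONDITION & SPEC =====
def Spec_func (b : List Int) (r : List Int) (out : List (Int × Int)) : Prop := out = func_alt b r
instance (b : List Int) (r : List Int) (out : List (Int × Int)) : Decidable (Spec_func b r out) := by unfold Spec_func; infer_instance

-- ===== CLAIM (what is proved, stated in full; the proofs are below) =====
def Claim_equal_func : Prop := ∀ (b : List Int) (r : List Int), Dom_func b r → Spec_func b r (func b r)

-- ===== LEMMAS AND PROOFS =====

-- the dict after i iterations of A's main loop: {k : k for k in range(min(i, len(r)))}
def dictD (c : Nat) : PySem.Dict Int Int :=
  PySem.Dict.mk ((List.range c).map (fun (k : Nat) => ((k : Int), (k : Int))))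

theorem values_dictD (c : Nat) : (dictD c).values = (List.range c).map (fun (k : Nat) => (k : Int)) := by
  simp only [dictD, PySem.Dict.values_mk, List.map_map]
  exact List.map_congr_left (fun a _ => rfl)

theorem keys_dictD (c : Nat) : (dictD c).keys = (List.range c).map (fun (k : Nat) => (k : Int)) := by
  simp only [dictD, PySem.Dict.keys_mk, List.map_map]
  exact List.map_congr_left (fun a _ => rfl)

theorem mem_cast_range (c j : Nat) :
    ((j : Int) ∈ (List.range c).map (fun (k : Nat) => (k : Int))) ↔ j < c := by
  constructor
  · rintro h
    obtain ⟨x, hx, hxj⟩ := List.mem_map.mp h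
    have hx' := List.mem_range.mp hx
    omega
  · intro h
    exact List.mem_map.mpr ⟨j, List.mem_range.mpr h, rfl⟩

theorem values_contains_dictD (c j : Nat) :
    (dictD c).values.contains ((j : Int)) = decide (j < c) := by
  rw [values_dictD]
  by_cases h : j < c
  · have hm := (mem_cast_range c j).mpr h
    simp [h, hm]
  · have hm : ¬ ((j : Int) ∈ (List.range c).map (fun (k : Nat) => (k : Int))) :=
      fun hmem => h ((mem_cast_range c j).mp hmem)
    simp [h, hm]

theorem nodup_keys_dictD (c : Nat) : (dictD c).keys.Nodup := by
  rw [keys_dictD]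
  exact List.nodup_range.map Nat.cast_injective

theorem contains_dictD_ge (c n : Nat) (h : c ≤ n) :
    (dictD c).contains ((n : Int)) = false := by
  rw [PySem.Dict.contains_eq_decide_mem_keys, keys_dictD, decide_eq_false_iff_not]
  intro hmem
  exact absurd ((mem_cast_range c n).mp hmem) (by omega)

theorem get?_dictD (c k : Nat) (h : k < c) :
    (dictD c).get? ((k : Int)) = some (k : Int) := by
  apply PySem.Dict.get?_of_mem_items _ _ (nodup_keys_dictD c)
  show ((k : Int), (k : Int)) ∈ (dictD c).items
  exact List.mem_map.mpr ⟨k, List.mem_range.mpr h, rfl⟩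

theorem innerA_skip (back : Int) (js rest : List Nat) :
    ∀ m : PySem.Dict Int Int, (∀ j ∈ js, m.values.contains ((j : Int)) = true) →
    innerA back m (js ++ rest) = innerA back m rest := by
  induction js with
  | nil => intro m _; rfl
  | cons j t ih =>
      intro m h
      have hj := h j (List.mem_cons_self ..)
      show (if m.values.contains ((j : Int)) = false then _ else innerA back m (t ++ rest)) = _
      rw [hj]
      simp only [Bool.true_eq_false, if_false]
      exact ih m (fun x hx => h x (List.mem_cons_of_mem _ hx))

theorem insert_dictD (c : Nat) : (dictD c).insert ((c : Int)) (c : Int) = dictD (c + 1) := by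
  apply PySem.Dict.ext
  have := PySem.Dict.items_foldl_insert_fresh (l := [c]) (k := fun (a : Nat) => ((a : Int)))
      (v := fun (a : Nat) => ((a : Int))) (d := dictD c)
      (by intro a ha; simp only [List.mem_singleton] at ha; subst ha
          exact contains_dictD_ge _ _ le_rfl)
      (by simp)
  simp only [List.foldl_cons, List.foldl_nil] at this
  rw [this]
  simp [dictD, List.range_succ]

theorem loop_inv (rs : List Int) (n : Nat) :
    (List.range n).foldl (fun (m : PySem.Dict Int Int) (i : Nat) =>
        if m.contains (i : Int) = false then innerA (i : Int) m (List.range rs.length)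
        else elseA (i : Int) rs m) PySem.Dict.empty = dictD (min n rs.length) := by
  induction n with
  | zero => rfl
  | succ n ih =>
      rw [List.range_succ, List.foldl_append, ih]
      simp only [List.foldl_cons, List.foldl_nil]
      rw [contains_dictD_ge (min n rs.length) n (Nat.min_le_left _ _)]
      by_cases h : n < rs.length
      · have hmin : min n rs.length = n := by omega
        have hsplit : List.range rs.length = List.range n ++ (n :: ((List.range (rs.length - n - 1)).map (fun k => n + 1 + k))) := by
          have he : rs.length = n + (1 + (rs.length - n - 1)) := by omega
          rw [he, List.range_add, List.range_add]
          simp [List.range_succ_eq_map, List.map_map, Function.comp_def]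
          omega
        rw [hmin, hsplit, innerA_skip _ _ _ _ (by
          intro j hj
          rw [values_contains_dictD]
          simp only [List.mem_range] at hj
          simp [hj])]
        show (if (dictD n).values.contains ((n : Int)) = false then (dictD n).insert ((n : Int)) ((n : Int)) else _) = _
        rw [values_contains_dictD]
        simp only [lt_self_iff_false, decide_false]
        rw [if_pos trivial, insert_dictD, show min (n + 1) rs.length = n + 1 by omega]
      · have hmin : min n rs.length = rs.length := by omega
        have hmin' : min (n + 1) rs.length = rs.length := by omega
        rw [hmin, hmin']
        have hsplit : List.range rs.length = List.range rs.length ++ ([] : List Nat) := by simp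
        rw [hsplit, innerA_skip _ _ _ _ (by
          intro j hj
          rw [values_contains_dictD]
          simp only [List.mem_range] at hj
          simp [show j < rs.length by omega])]
        rfl

theorem map_range_eq_zip (bs rs : List Int) :
    (List.range (min bs.length rs.length)).map
      (fun k => ((bs[k]?.getD 0), (rs[k]?.getD 0))) = List.zip bs rs := by
  apply List.ext_getElem
  · simp
  · intro i h1 h2
    simp only [List.length_map, List.length_range] at h1
    have hb : i < bs.length := by omega
    have hr : i < rs.length := by omega
    simp [List.getElem_zip, hb, hr]

theorem func_eq (b r : List Int) : func b r = func_alt b r := by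
  simp only [func, func_alt]
  rw [loop_inv, keys_dictD, PySem.List.foldl_append_singleton_eq_map, List.map_map,
      ← map_range_eq_zip]
  apply List.map_congr_left
  intro k hk
  simp only [List.mem_range] at hk
  simp only [Function.comp_apply]
  rw [get?_dictD _ _ hk]
  simp [PySem.List.pyGet?_natCast]

-- ===== VERDICT (by name: the statement is the Claim_ definition above) =====
theorem func_spec : Claim_equal_func := by
  intro b r _
  exact func_eq b r
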